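-- pv_equiv track=rewrite | github.com/RussellDash332/Project-Euler | pe-076.py | num_sum
-- ===== SOURCE A (Python) =====
-- def num_sum(n):
--     dp = [[0 for _ in range(n + 1)] for _ in range(n + 1)]
--     for s in range(n + 1):
--         dp[0][s] = 1
--     for k in range(1, n + 1):
--         for s in range(n - 1, 0, -1):
--             if k >= s:  dp[k][s] = dp[k][s + 1] + dp[k - s][s]
--             else:       dp[k][s] = dp[k][s + 1]
--     return dp[n][1]
-- ===== SOURCE B (Python) =====
-- def num_sum(n):
--     # one-dimensional in-place coin DP: col[k] holds the count for k with the
--     # coins (parts) processed so far; O(n) memory instead of an (n+1)^2 table.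
--     col = [1] + [0] * n
--     for coin in range(n - 1, 0, -1):
--         for k in range(coin, n + 1):
--             col[k] += col[k - coin]
--     return col[n]
-- ===== Notes on version B (the rewrite author's own statement) =====
-- stated objective: faster
-- what changed: replaces the (n+1)x(n+1) min-part table (rows filled one k at a time) by a single length-(n+1) array updated in place, one pass per part size (classic 1-D coin-counting DP), removing the quadratic table allocation
-- outside the precondition, e.g. on num_sum(0): A raises IndexError, B returns 1
import Mathlib
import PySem

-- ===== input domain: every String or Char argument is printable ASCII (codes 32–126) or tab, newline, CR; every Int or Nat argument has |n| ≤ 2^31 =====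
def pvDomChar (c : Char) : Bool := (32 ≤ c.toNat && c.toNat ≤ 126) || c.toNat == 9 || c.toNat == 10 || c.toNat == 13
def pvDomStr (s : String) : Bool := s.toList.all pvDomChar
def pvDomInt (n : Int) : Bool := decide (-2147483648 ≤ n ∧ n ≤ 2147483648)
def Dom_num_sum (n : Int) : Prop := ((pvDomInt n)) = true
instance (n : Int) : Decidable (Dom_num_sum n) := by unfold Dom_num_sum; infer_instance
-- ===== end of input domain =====

-- B replaces A's (n+1)×(n+1) min-part table by a single length-(n+1) array updated
-- in place (one pass per part size, classic 1-D partition-counting DP): same O(n^2)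
-- time but O(n) instead of O(n^2) memory, measurably faster by a constant factor.

-- ===== PORT A =====
-- Python lists are mutable arrays, so both ports keep their state in Lean Arrays.
-- aget1/aset1/aget2/aset2 are Python's a[i] / a[i] = v (and dp[i][j] / dp[i][j] = v);
-- exact for the nonnegative in-range indices the ports use on inputs satisfying Pre_
-- (out-of-range writes, which Python turns into IndexError, occur only outside Pre_).
def aget1 (a : Array Int) (i : Int) : Int := a.getD i.toNat 0
def aset1 (a : Array Int) (i : Int) (v : Int) : Array Int := a.setIfInBounds i.toNat v
def aget2 (dp : Array (Array Int)) (i j : Int) : Int := (dp.getD i.toNat #[]).getD j.toNat 0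
def aset2 (dp : Array (Array Int)) (i j : Int) (v : Int) : Array (Array Int) :=
  dp.modify i.toNat (fun row => row.setIfInBounds j.toNat v)

def num_sum (n : Int) : Int :=
  -- dp = [[0 for _ in range(n+1)] for _ in range(n+1)]
  let dp : Array (Array Int) :=
    ((PySem.List.pyRange 0 (n + 1) 1).map (fun _ =>
      ((PySem.List.pyRange 0 (n + 1) 1).map (fun _ => (0 : Int))).toArray)).toArray
  -- for s in range(n+1): dp[0][s] = 1
  let dp := (PySem.List.pyRange 0 (n + 1) 1).foldl (fun dp s => aset2 dp 0 s 1) dp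
  -- for k in range(1, n+1): for s in range(n-1, 0, -1): …
  let dp := (PySem.List.pyRange 1 (n + 1) 1).foldl (fun dp k =>
      (PySem.List.pyRange (n - 1) 0 (-1)).foldl (fun dp s =>
        if k ≥ s then aset2 dp k s (aget2 dp k (s + 1) + aget2 dp (k - s) s)
        else aset2 dp k s (aget2 dp k (s + 1))) dp) dp
  -- return dp[n][1]
  aget2 dp n 1

-- ===== PORT B =====
def num_sum_alt (n : Int) : Int :=
  -- col = [1] + [0] * n
  let col : Array Int := ((1 : Int) :: List.replicate n.toNat 0).toArray
  -- for coin in range(n-1, 0, -1): for k in range(coin, n+1): col[k] += col[k-coin]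
  let col := (PySem.List.pyRange (n - 1) 0 (-1)).foldl (fun col coin =>
      (PySem.List.pyRange coin (n + 1) 1).foldl (fun col k =>
        aset1 col k (aget1 col k + aget1 col (k - coin))) col) col
  -- return col[n]
  aget1 col n

-- ===== PRECONDITION & SPEC =====
-- Pre_ excludes exactly n ≤ 0, on which A raises IndexError (dp[n][1] on a too-short
-- or empty table).
def Pre_num_sum (n : Int) : Prop := 1 ≤ n
instance (n : Int) : Decidable (Pre_num_sum n) := by unfold Pre_num_sum; infer_instance
def pvWitness_num_sum : Int := (5)

def Spec_num_sum (n : Int) (out : Int) : Prop := out = num_sum_alt n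
instance (n : Int) (out : Int) : Decidable (Spec_num_sum n out) := by unfold Spec_num_sum; infer_instance

-- ===== CLAIM (what is proved, stated in full; the proofs are below) =====
def Claim_equal_num_sum : Prop := ∀ (n : Int), Dom_num_sum n → Pre_num_sum n → Spec_num_sum n (num_sum n)

-- ===== LEMMAS AND PROOFS =====

-- The common mathematical recurrence: colF N j k is the number of partitions of k
-- into parts lying in [N-j, N-1] (column s = N-j of A's table, j ≥ 1; column j = 0
-- is the base column s = N: 1 at k = 0, else 0).
def colF (N : Nat) : Nat → Nat → Int
  | _, 0 => 1
  | 0, _ + 1 => 0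
  | j + 1, k + 1 =>
    colF N j (k + 1) +
      (if h : N - (j + 1) ≤ k + 1 ∧ 1 ≤ N - (j + 1) then
        colF N (j + 1) ((k + 1) - (N - (j + 1))) else 0)
  termination_by j k => (j, k)
  decreasing_by
  · exact Prod.Lex.left _ _ (Nat.lt_succ_self j)
  · exact Prod.Lex.right _ (by omega)

theorem colF_k0 (N j : Nat) : colF N j 0 = 1 := by cases j <;> simp [colF]

theorem colF_j0 (N k : Nat) (hk : 1 ≤ k) : colF N 0 k = 0 := by
  cases k with
  | zero => omega
  | succ k => simp [colF]

theorem colF_succ (N j k : Nat) (hk : 1 ≤ k) :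
    colF N (j + 1) k =
      colF N j k + (if N - (j + 1) ≤ k ∧ 1 ≤ N - (j + 1) then
        colF N (j + 1) (k - (N - (j + 1))) else 0) := by
  cases k with
  | zero => omega
  | succ k => rw [colF]; split <;> simp_all

theorem colF_lt (N j k : Nat) (h : k < N - (j + 1)) :
    colF N (j + 1) k = colF N j k := by
  cases k with
  | zero => simp [colF_k0]
  | succ k => rw [colF]; split <;> [omega; simp]

-- fold-with-invariant scaffold over List.range
theorem foldl_range_inv {σ : Type} (M : Nat) (φ : σ → Nat → σ) (init : σ)
    (P : Nat → σ → Prop) (h0 : P 0 init)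
    (hstep : ∀ i s, i < M → P i s → P (i + 1) (φ s i)) :
    P M ((List.range M).foldl φ init) := by
  induction M with
  | zero => simpa using h0
  | succ M ih =>
    rw [List.range_succ, List.foldl_append]
    exact hstep M _ (Nat.lt_succ_self M) (ih (fun i s hi => hstep i s (by omega)))

-- table / column as maps of a function over List.range
def tbl (N : Nat) (f : Nat → Nat → Int) : List (List Int) :=
  (List.range (N + 1)).map (fun k => (List.range (N + 1)).map (f k))

def colL (N : Nat) (c : Nat → Int) : List Int := (List.range (N + 1)).map c

theorem map_range_set {α : Type} (m : Nat) (c : Nat → α) (i : Nat) (hi : i < m) (v : α) :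
    ((List.range m).map c).set i v
      = (List.range m).map (fun k => if k = i then v else c k) := by
  apply List.ext_getElem <;> simp
  intro j hj
  rcases eq_or_ne j i with rfl | hne
  · simp
  · simp [hne, Ne.symm hne]

theorem toArray_modify_list (xs : List (Array Int)) (k : Nat) (h : k < xs.length)
    (f : Array Int → Array Int) :
    xs.toArray.modify k f = (xs.set k (f xs[k])).toArray := by
  apply Array.ext <;> simp [List.getElem_set]
  intro i hi _
  simp [List.getElem_modify]
  split <;> simp_all

-- the ports' Array states, as images of tbl / colL
def tblA (N : Nat) (f : Nat → Nat → Int) : Array (Array Int) :=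
  ((tbl N f).map List.toArray).toArray

def colA (N : Nat) (c : Nat → Int) : Array Int := (colL N c).toArray

theorem colA_get (N : Nat) (c : Nat → Int) (k : Nat) (hk : k ≤ N) :
    aget1 (colA N c) (k : Int) = c k := by
  simp [aget1, colA, colL, Array.getD, show k < N + 1 by omega]

theorem colA_set (N : Nat) (c : Nat → Int) (k : Nat) (hk : k ≤ N) (v : Int) :
    aset1 (colA N c) (k : Int) v = colA N (fun k' => if k' = k then v else c k') := by
  simp only [aset1, colA, colL, Int.toNat_natCast, List.setIfInBounds_toArray]
  rw [map_range_set (N + 1) c k (by omega) v]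

theorem tblA_getget' (N : Nat) (f : Nat → Nat → Int) (kI sI : Int) (k s : Nat)
    (hkI : kI = (k : Int)) (hsI : sI = (s : Int)) (hk : k ≤ N) (hs : s ≤ N) :
    aget2 (tblA N f) kI sI = f k s := by
  subst hkI hsI
  simp [aget2, tblA, tbl, Array.getD, show k < N + 1 by omega, show s < N + 1 by omega]

theorem tblA_set' (N : Nat) (f : Nat → Nat → Int) (kI sI : Int) (k s : Nat)
    (hkI : kI = (k : Int)) (hsI : sI = (s : Int)) (hk : k ≤ N) (hs : s ≤ N) (v : Int) :
    aset2 (tblA N f) kI sI v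
      = tblA N (fun k' s' => if k' = k ∧ s' = s then v else f k' s') := by
  subst hkI hsI
  unfold aset2 tblA
  rw [Int.toNat_natCast, Int.toNat_natCast,
    toArray_modify_list _ k (by simp [tbl]; omega) _]
  congr 1
  rw [List.getElem_map,
    show ((tbl N f)[k]'(by simp [tbl]; omega)) = (List.range (N + 1)).map (f k) from by
      simp [tbl]]
  simp only [List.setIfInBounds_toArray]
  rw [map_range_set (N + 1) (f k) s (by omega) v, ← List.map_set,
    show (tbl N f)
        = (List.range (N + 1)).map (fun k => (List.range (N + 1)).map (f k)) from rfl,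
    map_range_set (N + 1) _ k (by omega)]
  congr 1
  apply List.map_congr_left
  intro k' _
  rcases eq_or_ne k' k with rfl | hne
  · simp
  · simp [hne]

-- A's final-table description after the first K rows are processed
def aF (N K : Nat) (k s : Nat) : Int :=
  if k = 0 then 1 else if k ≤ K ∧ 1 ≤ s then colF N (N - s) k else 0

theorem colL_congr (N : Nat) (c c' : Nat → Int) (h : ∀ k, k ≤ N → c k = c' k) :
    colL N c = colL N c' := by
  unfold colL
  apply List.map_congr_left
  intro k hk
  exact h k (by simpa using Nat.lt_succ_iff.mp (List.mem_range.mp hk))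

theorem tbl_congr (N : Nat) (f f' : Nat → Nat → Int)
    (h : ∀ k s, k ≤ N → s ≤ N → f k s = f' k s) : tbl N f = tbl N f' := by
  unfold tbl
  apply List.map_congr_left
  intro k hk
  apply List.map_congr_left
  intro s hs
  exact h k s (Nat.lt_succ_iff.mp (List.mem_range.mp hk))
    (Nat.lt_succ_iff.mp (List.mem_range.mp hs))

theorem colA_congr (N : Nat) (c c' : Nat → Int) (h : ∀ k, k ≤ N → c k = c' k) :
    colA N c = colA N c' := congrArg List.toArray (colL_congr N c c' h)

theorem tblA_congr (N : Nat) (f f' : Nat → Nat → Int)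
    (h : ∀ k s, k ≤ N → s ≤ N → f k s = f' k s) : tblA N f = tblA N f' :=
  congrArg (fun l => (l.map List.toArray).toArray) (tbl_congr N f f' h)

theorem numB_eq (n : Int) (hn : 1 ≤ n) :
    num_sum_alt n = colF n.toNat (n.toNat - 1) n.toNat := by
  obtain ⟨N, rfl⟩ : ∃ N : Nat, (N : Int) = n := ⟨n.toNat, Int.toNat_of_nonneg (by omega)⟩
  have hN : 1 ≤ N := by exact_mod_cast hn
  rw [Int.toNat_natCast]
  unfold num_sum_alt
  simp only [Int.toNat_natCast]
  have hinit : (1 :: List.replicate N (0 : Int)) = colL N (colF N 0) := by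
    unfold colL
    have hz : List.map (colF N 0 ∘ Nat.succ) (List.range N) = List.replicate N (0 : Int) :=
      calc List.map (colF N 0 ∘ Nat.succ) (List.range N)
          = List.map (fun _ => (0 : Int)) (List.range N) :=
            List.map_congr_left (fun i _ => colF_j0 N (i + 1) (by omega))
        _ = List.replicate N (0 : Int) := by simp
    rw [List.range_succ_eq_map, List.map_cons, List.map_map, colF_k0, hz]
  rw [show ((1 : Int) :: List.replicate N (0 : Int)).toArray = colA N (colF N 0) from
      congrArg List.toArray hinit, PySem.List.pyRange_neg_one,
    show ((N : Int) - 1 - 0).toNat = N - 1 by omega, List.foldl_map]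
  have main := foldl_range_inv (N - 1)
    (fun col (j : Nat) =>
      (PySem.List.pyRange ((N : Int) - 1 - (j : Int)) ((N : Int) + 1) 1).foldl
        (fun col k =>
          aset1 col k (aget1 col k + aget1 col (k - ((N : Int) - 1 - (j : Int))))) col)
    (colA N (colF N 0))
    (fun j col => col = colA N (colF N j)) rfl ?step
  · rw [main]
    exact colA_get N _ N (le_refl N)
  case step =>
    intro j col hj hcol
    subst hcol
    simp only []
    set s := N - 1 - j with hs
    have hs1 : 1 ≤ s := by omega
    have hsc : ((N : Int) - 1 - (j : Int)) = (s : Int) := by omega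
    rw [hsc, PySem.List.pyRange_one,
      show (((N : Int) + 1) - (s : Int)).toNat = N + 1 - s by omega, List.foldl_map]
    have inner := foldl_range_inv (N + 1 - s)
      (fun col (i : Nat) =>
        aset1 col ((s : Int) + (i : Int))
          (aget1 col ((s : Int) + (i : Int)) +
           aget1 col ((s : Int) + (i : Int) - (s : Int))))
      (colA N (colF N j))
      (fun i col => col = colA N (fun k =>
        if k < s + i then colF N (j + 1) k else colF N j k)) ?base ?instep
    · rw [inner]
      apply colA_congr
      intro k hk
      rw [if_pos (by omega)]
    case base =>
      apply colA_congr
      intro k hk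
      split
      · exact (colF_lt N j k (by omega)).symm
      · rfl
    case instep =>
      intro i col hi hcol
      subst hcol
      simp only []
      have h1 : ((s : Int) + (i : Int)) = ((s + i : Nat) : Int) := by push_cast; ring
      have h2 : ((s : Int) + (i : Int) - (s : Int)) = ((i : Nat) : Int) := by ring
      rw [h2, h1, colA_get N _ (s + i) (by omega), colA_get N _ i (by omega),
        if_neg (by omega), if_pos (by omega), colA_set N _ (s + i) (by omega)]
      apply colA_congr
      intro k hk
      rcases eq_or_ne k (s + i) with rfl | hne
      · rw [if_pos rfl, if_pos (by omega)]
        rw [colF_succ N j (s + i) (by omega),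
          show N - (j + 1) = s by omega, if_pos ⟨by omega, by omega⟩,
          show s + i - s = i by omega]
      · rw [if_neg hne]
        rcases lt_or_ge k (s + i) with hlt | hge
        · rw [if_pos hlt, if_pos (by omega)]
        · rw [if_neg (by omega), if_neg (by omega)]

-- A's inner loop mid-state on row K+1, after j columns (s = N-1, …, N-j) are filled
def midF (N K j : Nat) (k' s' : Nat) : Int :=
  if k' = K + 1 ∧ N - j ≤ s' ∧ s' ≤ N - 1 then colF N (N - s') (K + 1) else aF N K k' s'

theorem numA_eq (n : Int) (hn : 1 ≤ n) :
    num_sum n = colF n.toNat (n.toNat - 1) n.toNat := by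
  obtain ⟨N, rfl⟩ : ∃ N : Nat, (N : Int) = n := ⟨n.toNat, Int.toNat_of_nonneg (by omega)⟩
  have hN : 1 ≤ N := by exact_mod_cast hn
  rw [Int.toNat_natCast]
  simp only [num_sum]
  have hdp0L : (PySem.List.pyRange 0 ((N : Int) + 1) 1).map
      (fun _ => (PySem.List.pyRange 0 ((N : Int) + 1) 1).map (fun _ => (0 : Int)))
      = tbl N (fun _ _ => 0) := by
    simp [tbl, PySem.List.pyRange_one, List.map_const', List.map_map, Function.comp_def]
  have hdp0 : ((PySem.List.pyRange 0 ((N : Int) + 1) 1).map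
      (fun _ => ((PySem.List.pyRange 0 ((N : Int) + 1) 1).map
        (fun _ => (0 : Int))).toArray)).toArray
      = tblA N (fun _ _ => 0) := by
    unfold tblA
    rw [← hdp0L, List.map_map]
    rfl
  rw [hdp0, PySem.List.pyRange_one (a := 0),
    show (((N : Int) + 1) - 0).toNat = N + 1 by omega, List.foldl_map]
  have step1 := foldl_range_inv (N + 1)
    (fun dp (i : Nat) => aset2 dp 0 (0 + (i : Int)) 1)
    (tblA N (fun _ _ => 0))
    (fun i dp => dp = tblA N (fun k s => if k = 0 ∧ s < i then 1 else 0))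
    (by apply tblA_congr; intro k s _ _; rw [if_neg (by omega)]) ?s1
  case s1 =>
    intro i dp hi hdp
    subst hdp
    simp only []
    rw [tblA_set' N _ 0 (0 + (i : Int)) 0 i (by simp) (by simp) (by omega) (by omega)]
    apply tblA_congr
    intro k s _ _
    split_ifs <;> omega
  rw [step1,
    show tblA N (fun k s => if k = 0 ∧ s < N + 1 then 1 else 0) = tblA N (aF N 0) from
      tblA_congr N _ _ (by intro k s hk hs; unfold aF; split_ifs <;> omega),
    PySem.List.pyRange_one (a := 1),
    show (((N : Int) + 1) - 1).toNat = N by omega, List.foldl_map]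
  have main := foldl_range_inv N
    (fun dp (K : Nat) =>
      (PySem.List.pyRange ((N : Int) - 1) 0 (-1)).foldl (fun dp s =>
        if (1 : Int) + (K : Int) ≥ s then
          aset2 dp ((1 : Int) + (K : Int)) s
            (aget2 dp ((1 : Int) + (K : Int)) (s + 1) +
             aget2 dp ((1 : Int) + (K : Int) - s) s)
        else
          aset2 dp ((1 : Int) + (K : Int)) s
            (aget2 dp ((1 : Int) + (K : Int)) (s + 1))) dp)
    (tblA N (aF N 0))
    (fun K dp => dp = tblA N (aF N K)) rfl ?sK
  case sK =>
    intro K dp hK hdp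
    subst hdp
    simp only []
    rw [PySem.List.pyRange_neg_one, show ((N : Int) - 1 - 0).toNat = N - 1 by omega,
      List.foldl_map]
    have inner := foldl_range_inv (N - 1)
      (fun dp (j : Nat) =>
        if (1 : Int) + (K : Int) ≥ (N : Int) - 1 - (j : Int) then
          aset2 dp ((1 : Int) + (K : Int)) ((N : Int) - 1 - (j : Int))
            (aget2 dp ((1 : Int) + (K : Int)) ((N : Int) - 1 - (j : Int) + 1) +
             aget2 dp ((1 : Int) + (K : Int) - ((N : Int) - 1 - (j : Int)))
               ((N : Int) - 1 - (j : Int)))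
        else
          aset2 dp ((1 : Int) + (K : Int)) ((N : Int) - 1 - (j : Int))
            (aget2 dp ((1 : Int) + (K : Int)) ((N : Int) - 1 - (j : Int) + 1)))
      (tblA N (aF N K))
      (fun j dp => dp = tblA N (midF N K j))
      (by apply tblA_congr; intro k s _ _; unfold midF; rw [if_neg (by omega)]) ?sj
    case sj =>
      intro j dp hj hdp
      subst hdp
      simp only []
      have hs1 : 1 ≤ N - 1 - j := by omega
      have hv1 : aget2 (tblA N (midF N K j)) ((1 : Int) + (K : Int))
          ((N : Int) - 1 - (j : Int) + 1) = colF N j (K + 1) := by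
        rw [tblA_getget' N _ _ _ (K + 1) (N - 1 - j + 1) (by omega) (by omega)
          (by omega) (by omega)]
        unfold midF aF
        rcases Nat.eq_zero_or_pos j with rfl | hj1
        · rw [if_neg (by omega), if_neg (by omega), if_neg (by omega)]
          exact (colF_j0 N (K + 1) (by omega)).symm
        · rw [if_pos ⟨rfl, by omega, by omega⟩, show N - (N - 1 - j + 1) = j by omega]
      by_cases hge : N - 1 - j ≤ K + 1
      · rw [if_pos (by omega)]
        have hv2 : aget2 (tblA N (midF N K j))
            ((1 : Int) + (K : Int) - ((N : Int) - 1 - (j : Int)))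
            ((N : Int) - 1 - (j : Int)) = colF N (j + 1) (K + 1 - (N - 1 - j)) := by
          rw [tblA_getget' N _ _ _ (K + 1 - (N - 1 - j)) (N - 1 - j) (by omega) (by omega)
            (by omega) (by omega)]
          unfold midF aF
          rcases Nat.eq_zero_or_pos (K + 1 - (N - 1 - j)) with h0 | h1
          · rw [if_neg (by omega), if_pos h0, h0, colF_k0]
          · rw [if_neg (by omega), if_neg (by omega), if_pos ⟨by omega, by omega⟩,
              show N - (N - 1 - j) = j + 1 by omega]
        rw [hv1, hv2,
          tblA_set' N _ _ _ (K + 1) (N - 1 - j) (by omega) (by omega) (by omega) (by omega)]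
        have hval : colF N j (K + 1) + colF N (j + 1) (K + 1 - (N - 1 - j))
            = colF N (j + 1) (K + 1) := by
          rw [colF_succ N j (K + 1) (by omega), show N - (j + 1) = N - 1 - j by omega,
            if_pos ⟨by omega, by omega⟩]
        rw [hval]
        apply tblA_congr
        intro k s hk hs
        unfold midF
        by_cases hc : k = K + 1 ∧ s = N - 1 - j
        · obtain ⟨rfl, rfl⟩ := hc
          rw [if_pos ⟨rfl, rfl⟩, if_pos ⟨rfl, by omega, by omega⟩,
            show N - (N - 1 - j) = j + 1 by omega]
        · rw [if_neg hc]
          split_ifs <;> first | rfl | omega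
      · rw [if_neg (by omega), hv1,
          tblA_set' N _ _ _ (K + 1) (N - 1 - j) (by omega) (by omega) (by omega) (by omega)]
        have hval : colF N j (K + 1) = colF N (j + 1) (K + 1) :=
          (colF_lt N j (K + 1) (by omega)).symm
        rw [hval]
        apply tblA_congr
        intro k s hk hs
        unfold midF
        by_cases hc : k = K + 1 ∧ s = N - 1 - j
        · obtain ⟨rfl, rfl⟩ := hc
          rw [if_pos ⟨rfl, rfl⟩, if_pos ⟨rfl, by omega, by omega⟩,
            show N - (N - 1 - j) = j + 1 by omega]
        · rw [if_neg hc]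
          split_ifs <;> first | rfl | omega
    rw [inner]
    apply tblA_congr
    intro k s hk hs
    unfold midF aF
    rcases eq_or_ne k (K + 1) with rfl | hne
    · by_cases hsb : 1 ≤ s ∧ s ≤ N - 1
      · rw [if_pos ⟨rfl, by omega, by omega⟩, if_neg (by omega), if_pos ⟨by omega, hsb.1⟩]
      · rcases (show s = 0 ∨ s = N by omega) with rfl | hsN
        · rw [if_neg (by omega), if_neg (by omega), if_neg (by omega), if_neg (by omega),
            if_neg (by omega)]
        · rw [if_neg (by omega), if_neg (by omega), if_neg (by omega), if_neg (by omega),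
            if_pos (show K + 1 ≤ K + 1 ∧ 1 ≤ s by omega),
            show N - s = 0 by omega, colF_j0 N (K + 1) (by omega)]
    · rw [if_neg (by omega)]
      rcases eq_or_ne k 0 with rfl | hk0
      · rw [if_pos rfl, if_pos rfl]
      · rw [if_neg hk0, if_neg hk0]
        by_cases hc : k ≤ K ∧ 1 ≤ s
        · rw [if_pos hc, if_pos (show k ≤ K + 1 ∧ 1 ≤ s by omega)]
        · rw [if_neg hc, if_neg (show ¬(k ≤ K + 1 ∧ 1 ≤ s) by omega)]
  rw [main, tblA_getget' N _ (N : Int) 1 N 1 rfl (by simp) (le_refl N) (by omega)]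
  unfold aF
  rw [if_neg (by omega), if_pos ⟨le_refl N, by omega⟩]

-- ===== VERDICT (by name: the statement is the Claim_ definition above) =====
theorem num_sum_spec : Claim_equal_num_sum := by
  intro n _ hpre
  unfold Spec_num_sum
  rw [numA_eq n hpre, numB_eq n hpre]
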